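-- pv_equiv track=rewrite | github.com/dmitryonyshchenko/AI_image_analyzer | image_processor.py | build_color_map
-- ===== SOURCE A (Python) =====
-- COLOR_PALETTE: list[str] = [
--     "#FF6B6B",  # coral red
--     "#4ECDC4",  # teal
--     "#45B7D1",  # sky blue
--     "#96CEB4",  # sage green
--     "#F7DC6F",  # gold
--     "#DDA0DD",  # plum
--     "#F0B27A",  # peach
--     "#98D8C8",  # mint
--     "#BB8FCE",  # lavender
--     "#F1948A",  # salmon
-- ]
--
-- def build_color_map(items: list[dict], palette: list[str] | None = None) -> dict[str, str]:
--     """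
--     Build a label → hex_color mapping by assigning palette colours in order
--     of first appearance among the items.  Useful for unlimited-class scenarios.
--     """
--     if palette is None:
--         palette = COLOR_PALETTE
--     color_map: dict[str, str] = {}
--     idx = 0
--     for item in items:
--         label = item.get("label", "unknown").lower()
--         if label not in color_map:
--             color_map[label] = palette[idx % len(palette)]
--             idx += 1
--     return color_map
-- ===== SOURCE B (Python) =====
-- COLOR_PALETTE: list[str] = [
--     "#FF6B6B",
--     "#4ECDC4",
--     "#45B7D1",
--     "#96CEB4",
--     "#F7DC6F",
--     "#DDA0DD",
--     "#F0B27A",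
--     "#98D8C8",
--     "#BB8FCE",
--     "#F1948A",
-- ]
--
--
-- def build_color_map(items: list[dict], palette: list[str] | None = None) -> dict[str, str]:
--     """Stateless prefix-scan formulation: a label is emitted at its first occurrence,
--     and its colour index is the number of distinct labels in the strict prefix."""
--     if palette is None:
--         palette = COLOR_PALETTE
--     labs = [item.get("label", "unknown").lower() for item in items]
--     return {
--         lab: palette[len(set(labs[:i])) % len(palette)]
--         for i, lab in enumerate(labs)
--         if lab not in labs[:i]
--     }
-- ===== Notes on version B (the rewrite author's own statement) =====
-- stated objective: alternative
-- what changed: Drops A's threaded dict-and-counter accumulator entirely: B is a stateless comprehension where each first-occurrence label independently gets palette[len(set(prefix)) % len(palette)], the colour index recomputed from the strict prefix instead of carried in a counter.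
import Mathlib
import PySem

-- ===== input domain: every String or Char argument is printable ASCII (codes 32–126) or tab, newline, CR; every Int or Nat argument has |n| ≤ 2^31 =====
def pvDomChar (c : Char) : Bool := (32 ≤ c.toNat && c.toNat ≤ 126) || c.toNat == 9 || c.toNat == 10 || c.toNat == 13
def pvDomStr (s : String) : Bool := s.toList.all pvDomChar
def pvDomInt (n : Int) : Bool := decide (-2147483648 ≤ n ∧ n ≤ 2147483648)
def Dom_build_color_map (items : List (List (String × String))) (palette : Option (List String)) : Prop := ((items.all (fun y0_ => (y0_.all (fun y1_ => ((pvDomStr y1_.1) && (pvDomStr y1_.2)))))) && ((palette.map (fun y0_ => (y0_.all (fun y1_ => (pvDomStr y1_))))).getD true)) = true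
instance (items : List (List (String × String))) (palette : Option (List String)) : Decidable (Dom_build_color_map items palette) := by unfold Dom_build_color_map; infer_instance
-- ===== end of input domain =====

-- B replaces A's threaded dict-and-counter loop by a stateless prefix-scan comprehension
-- (each first-occurrence label gets palette[len(set(prefix)) % len(palette)]);
-- same return value, objective: an alternative, accumulator-free formulation.

def pvColorPalette : List String :=
  ["#FF6B6B", "#4ECDC4", "#45B7D1", "#96CEB4", "#F7DC6F",
   "#DDA0DD", "#F0B27A", "#98D8C8", "#BB8FCE", "#F1948A"]

-- item.get("label", "unknown").lower()
def pvLabelOf (item : List (String × String)) : String :=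
  PySem.Str.lower ((PySem.Dict.mk item).getD "label" "unknown")

-- palette[i % len(palette)] (for the in-range indices the admitted inputs reach)
def pvColor (pal : List String) (i : Int) : String :=
  PySem.List.pyGetD pal (PySem.Int.mod i (pal.length : Int)) ""

-- ===== PORT A =====
def build_color_map (items : List (List (String × String))) (palette : Option (List String)) : List (String × String) :=
  let pal := palette.getD pvColorPalette
  (items.foldl
    (fun (st : PySem.Dict String String × Int) item =>
      let label := pvLabelOf item
      if st.1.contains label then st
      else (st.1.insert label (pvColor pal st.2), st.2 + 1))
    (PySem.Dict.empty, 0)).1.items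

-- ===== PORT B =====
def build_color_map_alt (items : List (List (String × String))) (palette : Option (List String)) : List (String × String) :=
  let pal := palette.getD pvColorPalette
  let labs := items.map pvLabelOf
  ((PySem.List.enumerate labs 0).filter
      (fun p => !((PySem.List.slice labs none (some p.1)).contains p.2))).map
    (fun p => (p.2,
      pvColor pal (PySem.Set.len (PySem.Set.ofList (PySem.List.slice labs none (some p.1))))))

-- ===== PRECONDITION & SPEC =====
-- Pre_ excludes an empty palette together with a nonempty items list: there Python A
-- raises ZeroDivisionError on the first label (and B raises the same way).
def Pre_build_color_map (items : List (List (String × String))) (palette : Option (List String)) : Prop :=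
  items = [] ∨ palette.getD pvColorPalette ≠ []
instance (items : List (List (String × String))) (palette : Option (List String)) : Decidable (Pre_build_color_map items palette) := by unfold Pre_build_color_map; infer_instance

def pvWitness_build_color_map : (List (List (String × String))) × Option (List String) :=
  ([[("label", "Cat")], [("label", "dog")]], none)

def Spec_build_color_map (items : List (List (String × String))) (palette : Option (List String)) (out : List (String × String)) : Prop := out = build_color_map_alt items palette
instance (items : List (List (String × String))) (palette : Option (List String)) (out : List (String × String)) : Decidable (Spec_build_color_map items palette out) := by unfold Spec_build_color_map; infer_instance

-- ===== CLAIM (what is proved, stated in full; the proofs are below) =====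
def Claim_equal_build_color_map : Prop := ∀ (items : List (List (String × String))) (palette : Option (List String)), Dom_build_color_map items palette → Pre_build_color_map items palette → Spec_build_color_map items palette (build_color_map items palette)

-- ===== LEMMAS AND PROOFS =====

-- The association list assigning colours by position to an ordered label list L.
def pvAssign (pal : List String) (L : List String) : List (String × String) :=
  (PySem.List.enumerate L 0).map (fun p => (p.2, pvColor pal p.1))

theorem pvAssign_nil (pal : List String) : pvAssign pal [] = [] := rfl

theorem pvAssign_append (pal : List String) (L : List String) (l : String) :
    pvAssign pal (L ++ [l]) = pvAssign pal L ++ [(l, pvColor pal (L.length : Int))] := by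
  simp [pvAssign, PySem.List.enumerate_append, PySem.List.enumerate_cons, PySem.List.enumerate_nil]

theorem pvKeys_assign (pal : List String) (L : List String) :
    (PySem.Dict.mk (pvAssign pal L)).keys = L := by
  simp [pvAssign, PySem.Dict.keys, List.map_map, Function.comp_def]

-- A's loop, characterised: starting from the dict for an ordered label list L it ends
-- at the dict for L updated with the items' labels (first occurrences appended).
theorem pvLoop (pal : List String) (items : List (List (String × String))) :
    ∀ L : List String,
      (items.foldl
        (fun (st : PySem.Dict String String × Int) item =>
          let label := pvLabelOf item
          if st.1.contains label then st
          else (st.1.insert label (pvColor pal st.2), st.2 + 1))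
        (PySem.Dict.mk (pvAssign pal L), (L.length : Int)))
      = (PySem.Dict.mk (pvAssign pal (PySem.Set.update L (items.map pvLabelOf))),
         ((PySem.Set.update L (items.map pvLabelOf)).length : Int)) := by
  induction items with
  | nil => intro L; simp [PySem.Set.update_nil]
  | cons item rest ih =>
    intro L
    have hc : (PySem.Dict.mk (pvAssign pal L)).contains (pvLabelOf item)
        = decide (pvLabelOf item ∈ L) := by
      rw [PySem.Dict.contains_eq_decide_mem_keys, pvKeys_assign]
    by_cases hmem : pvLabelOf item ∈ L
    · simp only [List.foldl_cons, List.map_cons, PySem.Set.update_cons,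
        PySem.Set.add_of_mem hmem, hc, hmem, decide_true, if_true]
      exact ih L
    · have hins : (PySem.Dict.mk (pvAssign pal L)).insert (pvLabelOf item)
          (pvColor pal (L.length : Int)) = PySem.Dict.mk (pvAssign pal (L ++ [pvLabelOf item])) := by
        apply PySem.Dict.ext
        rw [PySem.Dict.items_insert_of_not_contains _ _ (by simp [hc, hmem]), pvAssign_append]
      simp only [List.foldl_cons, List.map_cons, PySem.Set.update_cons,
        PySem.Set.add_of_not_mem hmem, hc, hmem, decide_false]
      have := ih (L ++ [pvLabelOf item])
      simpa [hins, List.length_append] using this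

-- B's comprehension, characterised: filtering first occurrences and colouring by the
-- distinct count of the strict prefix is exactly pvAssign on the deduplicated labels.
theorem pvScan (pal : List String) (labs : List String) :
    ((PySem.List.enumerate labs 0).filter
        (fun p => !((PySem.List.slice labs none (some p.1)).contains p.2))).map
      (fun p => (p.2,
        pvColor pal (PySem.Set.len (PySem.Set.ofList (PySem.List.slice labs none (some p.1))))))
    = pvAssign pal (PySem.Set.ofList labs) := by
  induction labs using List.reverseRecOn with
  | nil => rfl
  | append_singleton labs l ih =>
    -- prefix slices are unchanged when the list grows on the right
    have hpre : ∀ p ∈ PySem.List.enumerate labs (0 : Int),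
        PySem.List.slice (labs ++ [l]) none (some p.1) = PySem.List.slice labs none (some p.1) := by
      intro p hp
      obtain ⟨k, hk, rfl⟩ := (PySem.List.mem_enumerate_iff _ _ _).mp hp
      have h0 : ((0 : Int) + (k : Int)) = ((k : Nat) : Int) := by omega
      rw [h0, PySem.List.slice_to_natCast, PySem.List.slice_to_natCast,
        List.take_append_of_le_length (le_of_lt hk)]
    have hfil :
        ((PySem.List.enumerate labs (0:Int)).filter
            (fun p => !((PySem.List.slice (labs ++ [l]) none (some p.1)).contains p.2)))
          = ((PySem.List.enumerate labs (0:Int)).filter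
            (fun p => !((PySem.List.slice labs none (some p.1)).contains p.2))) := by
      apply List.filter_congr
      intro p hp; rw [hpre p hp]
    have hmapc : ∀ m : List (Int × String),
        (∀ p ∈ m, p ∈ PySem.List.enumerate labs (0:Int)) →
        m.map (fun p => (p.2,
            pvColor pal (PySem.Set.len (PySem.Set.ofList (PySem.List.slice (labs ++ [l]) none (some p.1))))))
        = m.map (fun p => (p.2,
            pvColor pal (PySem.Set.len (PySem.Set.ofList (PySem.List.slice labs none (some p.1)))))) := by
      intro m hm
      apply List.map_congr_left
      intro p hp; rw [hpre p (hm p hp)]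
    have hlast : PySem.List.slice (labs ++ [l]) none (some ((0:Int) + labs.length)) = labs := by
      have h0 : ((0 : Int) + (labs.length : Int)) = ((labs.length : Nat) : Int) := by omega
      rw [h0, PySem.List.slice_to_natCast, List.take_append_of_le_length (le_refl _),
        List.take_length]
    have hofl : PySem.Set.ofList (labs ++ [l]) = PySem.Set.add (PySem.Set.ofList labs) l := by
      rw [PySem.Set.ofList_eq_foldl, PySem.Set.ofList_eq_foldl, List.foldl_append]; rfl
    rw [PySem.List.enumerate_append, PySem.List.enumerate_cons, PySem.List.enumerate_nil,
      List.filter_append, List.filter_cons, List.filter_nil, hfil, hlast]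
    by_cases hmem : l ∈ labs
    · have hset : PySem.Set.ofList (labs ++ [l]) = PySem.Set.ofList labs := by
        rw [hofl, PySem.Set.add_of_mem ((PySem.Set.mem_ofList _ _).mpr hmem)]
      rw [if_neg (by simp [hmem]), List.append_nil,
        hmapc _ (fun p hp => List.mem_of_mem_filter hp), ih, hset]
    · have hset : PySem.Set.ofList (labs ++ [l]) = PySem.Set.ofList labs ++ [l] := by
        rw [hofl, PySem.Set.add_of_not_mem (fun h => hmem ((PySem.Set.mem_ofList _ _).mp h))]
      have hlen : PySem.Set.len (PySem.Set.ofList labs) = ((PySem.Set.ofList labs).length : Int) := rfl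
      rw [if_pos (by simp [hmem]), List.map_append,
        hmapc _ (fun p hp => List.mem_of_mem_filter hp), ih, hset, pvAssign_append,
        List.map_cons, List.map_nil, hlast, hlen]

-- ===== VERDICT (by name: the statement is the Claim_ definition above) =====
theorem build_color_map_spec : Claim_equal_build_color_map := by
  intro items palette _ _
  show build_color_map items palette = build_color_map_alt items palette
  unfold build_color_map build_color_map_alt
  have h := pvLoop (palette.getD pvColorPalette) items []
  simp only [List.length_nil, Int.natCast_zero, pvAssign_nil] at h
  simp only [PySem.Dict.empty, h]
  rw [pvScan]
  simp [PySem.Set.update_nil_left, pvAssign]
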